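-- pv_equiv track=rewrite | github.com/NKN-85/agenda-scraper | utils.py | _normalizar_dias_semana
-- ===== SOURCE A (Python) =====
-- def _normalizar_dias_semana(dias_semana):
--     if not dias_semana:
--         return []
--
--     resultado = []
--     for d in dias_semana:
--         if isinstance(d, int) and 0 <= d <= 6:
--             resultado.append(d)
--
--     return sorted(set(resultado))
-- ===== SOURCE B (Python) =====
-- def _normalizar_dias_semana(dias_semana):
--     # Loop inversion: enumerate the fixed codomain 0..6 in order and keep each
--     # day that occurs in the input; order and uniqueness come for free.
--     return [i for i in range(7)
--             if any(isinstance(d, int) and d == i for d in dias_semana)]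
-- ===== Notes on version B (the rewrite author's own statement) =====
-- stated objective: alternative
-- what changed: Inverts the loop: instead of scanning the input, collecting valid days, deduplicating with set() and sorting, B enumerates the fixed codomain range(7) in order and emits each day found in the input by a membership scan, so no intermediate list, no set and no sort.
import Mathlib
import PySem

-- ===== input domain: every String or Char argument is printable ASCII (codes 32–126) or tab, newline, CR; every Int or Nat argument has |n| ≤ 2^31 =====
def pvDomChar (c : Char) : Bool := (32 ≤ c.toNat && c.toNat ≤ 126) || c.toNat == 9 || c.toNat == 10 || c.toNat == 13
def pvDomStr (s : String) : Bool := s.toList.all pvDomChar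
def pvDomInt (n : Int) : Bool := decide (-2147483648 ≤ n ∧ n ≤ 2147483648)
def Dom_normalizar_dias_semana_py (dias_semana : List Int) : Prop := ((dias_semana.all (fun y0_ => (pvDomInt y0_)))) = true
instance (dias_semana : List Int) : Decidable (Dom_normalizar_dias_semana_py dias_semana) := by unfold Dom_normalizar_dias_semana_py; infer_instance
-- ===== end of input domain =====

-- B inverts the loop: it enumerates the codomain range(7) in order and keeps each
-- day present in the input (membership scan), so no collecting pass, no set, no sort.


-- ===== PORT A =====
def normalizar_dias_semana_py (dias_semana : List Int) : List Int :=
  if dias_semana = [] then []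
  else
    let resultado := dias_semana.foldl
      (fun acc d => if 0 ≤ d ∧ d ≤ 6 then acc ++ [d] else acc) []
    PySem.List.sorted (PySem.Set.ofList resultado) (fun x => x) false

-- ===== PORT B =====
-- `any(isinstance(d, int) and d == i for d in dias_semana)` → List.any with ==.
def normalizar_dias_semana_py_alt (dias_semana : List Int) : List Int :=
  (PySem.List.pyRange 0 7 1).filter (fun i => dias_semana.any (fun d => d == i))

-- ===== PRECONDITION & SPEC =====
def Spec_normalizar_dias_semana_py (dias_semana : List Int) (out : List Int) : Prop := out = normalizar_dias_semana_py_alt dias_semana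
instance (dias_semana : List Int) (out : List Int) : Decidable (Spec_normalizar_dias_semana_py dias_semana out) := by unfold Spec_normalizar_dias_semana_py; infer_instance

-- ===== CLAIM (what is proved, stated in full; the proofs are below) =====
def Claim_equal_normalizar_dias_semana_py : Prop := ∀ (dias_semana : List Int), Dom_normalizar_dias_semana_py dias_semana → Spec_normalizar_dias_semana_py dias_semana (normalizar_dias_semana_py dias_semana)

-- ===== LEMMAS AND PROOFS =====

lemma pvB_mem (ds : List Int) (x : Int) :
    x ∈ normalizar_dias_semana_py_alt ds ↔ (x ∈ ds ∧ 0 ≤ x ∧ x ≤ 6) := by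
  simp only [normalizar_dias_semana_py_alt, List.mem_filter, PySem.List.mem_pyRange_one,
    List.any_eq_true, beq_iff_eq]
  constructor
  · rintro ⟨⟨h0, h7⟩, d, hd, rfl⟩; exact ⟨hd, h0, by omega⟩
  · rintro ⟨hd, h0, h6⟩; exact ⟨⟨h0, by omega⟩, x, hd, rfl⟩

lemma pvB_nodup (ds : List Int) : (normalizar_dias_semana_py_alt ds).Nodup :=
  (PySem.List.nodup_pyRange_one 0 7).filter _

lemma pvB_pairwise (ds : List Int) :
    (normalizar_dias_semana_py_alt ds).Pairwise (fun a b => (a : Int) < b) :=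
  (PySem.List.pairwise_lt_pyRange_one 0 7).filter _

-- A side: the appended list is a filter, and set+sort of it equals B's output.
lemma pvA_eq (ds : List Int) :
    PySem.List.sorted
      (PySem.Set.ofList (ds.foldl
        (fun acc d => if 0 ≤ d ∧ d ≤ 6 then acc ++ [d] else acc) []))
      (fun x => x) false = normalizar_dias_semana_py_alt ds := by
  rw [PySem.List.foldl_append_ite_eq_filter]
  apply PySem.List.sorted_eq_of_perm_of_pairwise_lt
  · rw [List.perm_ext_iff_of_nodup (pvB_nodup ds) (PySem.Set.nodup_ofList _)]
    intro a
    rw [pvB_mem, PySem.Set.mem_ofList]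
    simp [List.mem_filter]
  · exact pvB_pairwise ds

-- ===== VERDICT (by name: the statement is the Claim_ definition above) =====
theorem normalizar_dias_semana_py_spec : Claim_equal_normalizar_dias_semana_py := by
  intro ds _
  unfold Spec_normalizar_dias_semana_py normalizar_dias_semana_py
  by_cases h : ds = []
  · subst h; rfl
  · simp only [h, if_false]
    exact pvA_eq ds
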